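-- pv_equiv track=rewrite | github.com/Ahemad7429/Problem-Solving | session_tests/session_test_11.py | max_removed_emitters
-- ===== SOURCE A (Python) =====
-- def max_removed_emitters(N, emitters, sx, sy):
--     # Store the counts of emitters in each row and column
--     row_count = [0] * 10001
--     col_count = [0] * 10001
--
--     # Iterate through the emitters to count occurrences in rows and columns
--     for x, y in emitters:
--         row_count[x] += 1
--         col_count[y] += 1
--
--     # Find the maximum counts of emitters in rows and columns
--     max_row_count = max(row_count)
--     max_col_count = max(col_count)
--
--     # Calculate the total count of removed emitters with a single shot
--     total_removed_emitters = max_row_count + max_col_count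
--
--     return total_removed_emitters
-- ===== SOURCE B (Python) =====
-- def _longest_run(values):
--     # length of the longest block of equal adjacent values
--     best = 0
--     cur = 0
--     prev = None
--     for v in values:
--         if prev is not None and v == prev:
--             cur += 1
--         else:
--             cur = 1
--             prev = v
--         if cur > best:
--             best = cur
--     return best
--
--
-- def max_removed_emitters(N, emitters, sx, sy):
--     # Sort each coordinate list; equal coordinates become adjacent, so the
--     # busiest row/column is the longest run of equal values.
--     xs = sorted(x for x, y in emitters)
--     ys = sorted(y for x, y in emitters)
--     return _longest_run(xs) + _longest_run(ys)
-- ===== Notes on version B (the rewrite author's own statement) =====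
-- stated objective: alternative
-- what changed: Replaces the two fixed 10001-entry counting arrays and full-array max() scans by sorting each coordinate list and taking the longest run of equal adjacent values in one scan; Pre_ excludes inputs with two coordinates differing by exactly 10001, where A's accidental negative-index wraparound merges the counts of coordinate -k with those of 10001-k (plus coordinates beyond [-10001,10000], where A raises IndexError).
-- outside the precondition, e.g. on max_removed_emitters(0, [(-1, 0), (10000, 0)], 0, 0): A returns 4, B returns 3
import Mathlib
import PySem

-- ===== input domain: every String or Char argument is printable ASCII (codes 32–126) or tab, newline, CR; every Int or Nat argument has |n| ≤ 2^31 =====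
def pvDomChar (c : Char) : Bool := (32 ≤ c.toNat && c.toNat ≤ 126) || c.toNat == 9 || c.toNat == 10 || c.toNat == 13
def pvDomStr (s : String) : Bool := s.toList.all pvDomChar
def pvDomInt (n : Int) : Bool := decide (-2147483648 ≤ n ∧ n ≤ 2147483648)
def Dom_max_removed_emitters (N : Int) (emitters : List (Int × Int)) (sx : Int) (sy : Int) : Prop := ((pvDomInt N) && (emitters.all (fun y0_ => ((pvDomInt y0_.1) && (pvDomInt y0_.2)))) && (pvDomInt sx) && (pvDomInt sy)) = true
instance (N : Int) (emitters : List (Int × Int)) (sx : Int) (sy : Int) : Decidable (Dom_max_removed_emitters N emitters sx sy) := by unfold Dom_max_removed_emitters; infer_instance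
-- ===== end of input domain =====

-- B sorts each coordinate list and takes the longest run of equal adjacent values in one
-- scan, instead of A's two fixed 10001-entry counting arrays with full-array max() scans.

-- ===== PORT A =====
-- row_count[x] += 1 (Python list indexing: negative index wraps, out of range raises;
-- the total pyGetD/pySetD forms are exact under Pre_, whose indices are in range).
def pvUpdA (l : List Int) (i : Int) : List Int :=
  PySem.List.pySetD l i (PySem.List.pyGetD l i 0 + 1)

def max_removed_emitters (N : Int) (emitters : List (Int × Int)) (sx : Int) (sy : Int) : Int :=
  -- row_count = [0] * 10001 ; col_count = [0] * 10001
  let init : List Int × List Int := (List.replicate 10001 0, List.replicate 10001 0)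
  -- for x, y in emitters: row_count[x] += 1 ; col_count[y] += 1
  let st := emitters.foldl (fun st e => (pvUpdA st.1 e.1, pvUpdA st.2 e.2)) init
  -- max(row_count) + max(col_count); the lists always have 10001 entries, so the
  -- default 0 of the total form maxD is never used (Python's max never sees []).
  PySem.List.maxD st.1 (fun v => v) 0 + PySem.List.maxD st.2 (fun v => v) 0

-- ===== PORT B =====
-- _longest_run: best = 0; cur = 0; prev = None; for v in values: …
def pvRunStep (st : Int × Int × Option Int) (v : Int) : Int × Int × Option Int :=
  -- if prev is not None and v == prev: cur += 1 else: cur = 1; prev = v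
  let cp := if st.2.2 = some v then (st.2.1 + 1, st.2.2) else (1, some v)
  -- if cur > best: best = cur
  if cp.1 > st.1 then (cp.1, cp.1, cp.2) else (st.1, cp.1, cp.2)

def pvLongestRun (values : List Int) : Int :=
  (values.foldl pvRunStep (0, 0, none)).1

def max_removed_emitters_alt (N : Int) (emitters : List (Int × Int)) (sx : Int) (sy : Int) : Int :=
  let xs := PySem.List.sorted (emitters.map (fun e => e.1)) (fun v => v) false
  let ys := PySem.List.sorted (emitters.map (fun e => e.2)) (fun v => v) false
  pvLongestRun xs + pvLongestRun ys

-- ===== PRECONDITION & SPEC =====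
-- Pre_ keeps every input on which A returns (all coordinates in [-10001, 10000]; beyond
-- that A raises IndexError) EXCEPT inputs holding two coordinates that differ by exactly
-- 10001: there Python's negative-index wraparound on A's length-10001 arrays merges the
-- counts of coordinate -k with those of 10001-k, an accident of A's storage that B's
-- sorted-run count does not reproduce.
def Pre_max_removed_emitters (N : Int) (emitters : List (Int × Int)) (sx : Int) (sy : Int) : Prop :=
  (∀ e ∈ emitters, (-10001 ≤ e.1 ∧ e.1 ≤ 10000) ∧ (-10001 ≤ e.2 ∧ e.2 ≤ 10000)) ∧
  (∀ e ∈ emitters, ∀ e' ∈ emitters, e.1 - e'.1 ≠ 10001 ∧ e.2 - e'.2 ≠ 10001)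
instance (N : Int) (emitters : List (Int × Int)) (sx : Int) (sy : Int) : Decidable (Pre_max_removed_emitters N emitters sx sy) := by unfold Pre_max_removed_emitters; infer_instance

def pvWitness_max_removed_emitters : Int × (List (Int × Int)) × Int × Int :=
  (10, [(1, 2), (1, 3), (5, 2)], 0, 0)

def Spec_max_removed_emitters (N : Int) (emitters : List (Int × Int)) (sx : Int) (sy : Int) (out : Int) : Prop := out = max_removed_emitters_alt N emitters sx sy
instance (N : Int) (emitters : List (Int × Int)) (sx : Int) (sy : Int) (out : Int) : Decidable (Spec_max_removed_emitters N emitters sx sy out) := by unfold Spec_max_removed_emitters; infer_instance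

-- ===== CLAIM (what is proved, stated in full; the proofs are below) =====
def Claim_equal_max_removed_emitters : Prop := ∀ (N : Int) (emitters : List (Int × Int)) (sx : Int) (sy : Int), Dom_max_removed_emitters N emitters sx sy → Pre_max_removed_emitters N emitters sx sy → Spec_max_removed_emitters N emitters sx sy (max_removed_emitters N emitters sx sy)

-- ===== LEMMAS AND PROOFS =====

-- the common value both sides are reduced to: the largest multiplicity in m (0 if empty)
def pvBestCount (m : List Int) : Int := (m.map (fun v => (m.count v : Int))).foldr max 0

lemma pvFoldrMax_nonneg (xs : List Int) : 0 ≤ xs.foldr max 0 := by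
  induction xs with
  | nil => simp
  | cons a t ih => simp only [List.foldr]; exact le_max_of_le_right ih

lemma pvLe_foldrMax {x : Int} {xs : List Int} (h : x ∈ xs) : x ≤ xs.foldr max 0 := by
  induction xs with
  | nil => simp at h
  | cons a t ih =>
    rcases List.mem_cons.mp h with rfl | h'
    · exact le_max_left _ _
    · exact le_trans (ih h') (le_max_right _ _)

lemma pvFoldrMax_le {xs : List Int} {m : Int} (h : ∀ x ∈ xs, x ≤ m) (h0 : 0 ≤ m) :
    xs.foldr max 0 ≤ m := by
  induction xs with
  | nil => simpa using h0
  | cons a t ih =>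
    simp only [List.foldr]
    exact max_le (h a (by simp)) (ih fun x hx => h x (by simp [hx]))

lemma pvBestCount_nonneg (m : List Int) : 0 ≤ pvBestCount m := pvFoldrMax_nonneg _

lemma pvBestCount_perm {l l' : List Int} (h : l.Perm l') : pvBestCount l = pvBestCount l' := by
  unfold pvBestCount
  have hc : l.map (fun v => (l.count v : Int)) = l.map (fun v => (l'.count v : Int)) :=
    List.map_congr_left fun x _ => by rw [h.count_eq]
  rw [hc]
  exact (h.map _).foldr_eq 0

lemma pvBestCount_cons (a : Int) (t : List Int) :
    pvBestCount (a :: t) =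
      max ((t.count a : Int) + 1) (pvBestCount (t.filter (fun x => !(x == a)))) := by
  set t' := t.filter (fun x => !(x == a)) with ht'
  have hga : ((a :: t).count a : Int) = (t.count a : Int) + 1 := by
    rw [List.count_cons_self]; push_cast; ring
  have hcnt : ∀ v : Int, v ≠ a → (t'.count v : Int) = ((a :: t).count v : Int) := by
    intro v hv
    rw [ht', List.count_filter (by simpa using hv)]
    simp [Ne.symm hv]
  apply le_antisymm
  · apply pvFoldrMax_le
    · intro x hx
      obtain ⟨v, hvmem, rfl⟩ := List.mem_map.mp hx
      by_cases hva : v = a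
      · subst hva; rw [hga]; exact le_max_left _ _
      · have hvt : v ∈ t' := by
          rw [ht']; exact List.mem_filter.mpr ⟨(List.mem_cons.mp hvmem).resolve_left hva, by simp [hva]⟩
        calc ((a :: t).count v : Int) = (t'.count v : Int) := (hcnt v hva).symm
          _ ≤ pvBestCount t' := pvLe_foldrMax (List.mem_map.mpr ⟨v, hvt, rfl⟩)
          _ ≤ _ := le_max_right _ _
    · exact le_max_of_le_left (by rw [← hga]; positivity)
  · apply max_le
    · rw [← hga]
      exact pvLe_foldrMax (List.mem_map.mpr ⟨a, by simp, rfl⟩)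
    · apply pvFoldrMax_le
      · intro x hx
        obtain ⟨v, hvmem, rfl⟩ := List.mem_map.mp hx
        have hva : v ≠ a := by
          rw [ht'] at hvmem
          have := (List.mem_filter.mp hvmem).2
          simpa using this
        rw [hcnt v hva]
        exact pvLe_foldrMax (List.mem_map.mpr
          ⟨v, by rw [ht'] at hvmem; exact List.mem_cons_of_mem a (List.mem_filter.mp hvmem).1, rfl⟩)
      · exact pvBestCount_nonneg _

-- the run-scanning fold on a sorted tail, characterised
lemma pvRun_aux (l : List Int) : ∀ (b c p : Int), l.Pairwise (· ≤ ·) → (∀ x ∈ l, p ≤ x) →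
    1 ≤ c → c ≤ b →
    (l.foldl pvRunStep (b, c, some p)).1 =
      max b (max (c + (l.count p : Int)) (pvBestCount (l.filter (fun x => !(x == p))))) := by
  induction l with
  | nil =>
    intro b c p _ _ h1 h2
    simp only [List.foldl_nil, List.count_nil, List.filter_nil]
    have h0 : pvBestCount [] = 0 := rfl
    rw [h0]; push_cast; omega
  | cons a t ih =>
    intro b c p hpw hlb h1 h2
    have hpw' := (List.pairwise_cons.mp hpw).2
    have hta : ∀ x ∈ t, a ≤ x := (List.pairwise_cons.mp hpw).1
    by_cases hap : a = p
    · subst hap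
      have hstep : pvRunStep (b, c, some a) a =
          (max b (c + 1), c + 1, some a) := by
        simp only [pvRunStep]
        norm_num
        split
        · next h => rw [max_eq_right (by omega)]
        · next h => rw [max_eq_left (by omega)]
      rw [List.foldl_cons, hstep,
        ih (max b (c + 1)) (c + 1) a hpw' hta (by omega) (le_max_right _ _)]
      rw [List.count_cons_self, List.filter_cons_of_neg (by simp)]
      have hc0 : (0 : Int) ≤ (t.count a : Int) := by positivity
      push_cast
      omega
    · have hpa : p < a := lt_of_le_of_ne (hlb a (by simp)) (Ne.symm hap)
      have hstep : pvRunStep (b, c, some p) a = (b, 1, some a) := by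
        have hpa' : p ≠ a := fun h => hap h.symm
        simp only [pvRunStep]
        norm_num [hpa']
        intro h; omega
      have hnp : ∀ x ∈ a :: t, x ≠ p := by
        intro x hx
        have := hlb x hx
        rcases List.mem_cons.mp hx with rfl | hxt
        · omega
        · have := hta x hxt; omega
      rw [List.foldl_cons, hstep, ih b 1 a hpw' hta le_rfl (by omega)]
      have hcp : (a :: t).count p = 0 := by
        rw [List.count_eq_zero]
        intro hmem; exact hnp p hmem rfl
      have hfp : (a :: t).filter (fun x => !(x == p)) = a :: t := by
        apply List.filter_eq_self.mpr
        intro x hx; simp [hnp x hx]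
      rw [hcp, hfp, pvBestCount_cons a t]
      have hc0 : (0 : Int) ≤ (t.count a : Int) := by positivity
      have hb0 : 0 ≤ pvBestCount (t.filter (fun x => !(x == a))) := pvBestCount_nonneg _
      push_cast
      omega

lemma pvRun_eq_bestCount (l : List Int) (h : l.Pairwise (· ≤ ·)) :
    pvLongestRun l = pvBestCount l := by
  cases l with
  | nil => rfl
  | cons a t =>
    have hstep : pvRunStep (0, 0, none) a = (1, 1, some a) := by
      simp [pvRunStep]
    unfold pvLongestRun
    rw [List.foldl_cons, hstep,
      pvRun_aux t 1 1 a (List.pairwise_cons.mp h).2 (List.pairwise_cons.mp h).1 le_rfl le_rfl,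
      pvBestCount_cons a t]
    have hc0 : (0 : Int) ≤ (t.count a : Int) := by positivity
    have hb0 : 0 ≤ pvBestCount (t.filter (fun x => !(x == a))) := pvBestCount_nonneg _
    omega

-- B's side: longest run of the sorted coordinate list is the largest multiplicity
lemma pvB_side (ks : List Int) :
    pvLongestRun (PySem.List.sorted ks (fun v => v) false) = pvBestCount ks := by
  rw [pvRun_eq_bestCount _ (PySem.List.sorted_pairwise ks (fun v => v))]
  exact pvBestCount_perm (PySem.List.sorted_perm ks (fun v => v) false)

-- A's side -------------------------------------------------------------------

-- the array position Python index i lands on (for in-range i)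
def pvKey (i : Int) : Int := PySem.Int.mod i 10001

lemma pvKey_eq_emod (i : Int) : pvKey i = i % 10001 :=
  PySem.Int.mod_eq_emod_of_pos (by norm_num)

-- one in-range Python increment acts at array position (i % 10001)
lemma pvUpdA_eq_set (l : List Int) (i : Int) (hl : l.length = 10001)
    (hi : -10001 ≤ i ∧ i ≤ 10000) :
    pvUpdA l i = l.set (pvKey i).toNat (l.getD (pvKey i).toNat 0 + 1) := by
  have hk := pvKey_eq_emod i
  unfold pvUpdA PySem.List.pySetD PySem.List.pySet? PySem.List.pyGetD PySem.List.pyGet?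
    PySem.List.pyIdx?
  rw [hl]
  by_cases h0 : 0 ≤ i
  · have h1 : i < (10001 : Int) := by omega
    have : (pvKey i).toNat = i.toNat := by omega
    simp [h0, h1, this, List.getD_eq_getElem?_getD]
  · have h2 : -(10001 : Int) ≤ i := hi.1
    have : (pvKey i).toNat = 10001 - (-i).toNat := by omega
    simp [h0, h2, this, List.getD_eq_getElem?_getD]

-- the counting loop: after the fold, position p holds its start value plus the number
-- of processed indices whose array position is p
lemma pvFold_char (ks : List Int) :
    ∀ l : List Int, l.length = 10001 → (∀ k ∈ ks, -10001 ≤ k ∧ k ≤ 10000) →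
      (ks.foldl pvUpdA l).length = 10001 ∧
      ∀ p : Nat, p < 10001 →
        (ks.foldl pvUpdA l).getD p 0 = l.getD p 0 + ((ks.map pvKey).count (p : Int) : Int) := by
  induction ks with
  | nil => intro l hl _; simpa using hl
  | cons k ks ih =>
    intro l hl hb
    have hk := hb k (by simp)
    have hset := pvUpdA_eq_set l k hl hk
    have hl' : (pvUpdA l k).length = 10001 := by rw [hset]; simpa using hl
    obtain ⟨hlen, hchar⟩ := ih (pvUpdA l k) hl' (fun x hx => hb x (by simp [hx]))
    refine ⟨by simpa using hlen, ?_⟩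
    intro p hp
    have hkey : 0 ≤ pvKey k ∧ pvKey k < 10001 :=
      ⟨PySem.Int.mod_nonneg k (by norm_num), PySem.Int.mod_lt k (by norm_num)⟩
    rw [List.foldl_cons, hchar p hp, hset]
    by_cases hpk : p = (pvKey k).toNat
    · subst hpk
      rw [List.getD_eq_getElem?_getD, List.getElem?_set_self (by omega)]
      have hcast : (((pvKey k).toNat : Nat) : Int) = pvKey k := by omega
      simp only [List.map_cons, List.count_cons, hcast, beq_self_eq_true,
        List.getD_eq_getElem?_getD]
      simp
      ring
    · rw [List.getD_eq_getElem?_getD, List.getElem?_set_ne (fun h => hpk h.symm),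
        ← List.getD_eq_getElem?_getD]
      simp only [List.map_cons, List.count_cons]
      have hcast : (¬ pvKey k = (p : Int)) := by omega
      simp [hcast]

-- multiplicities are preserved by taking array positions when no two distinct
-- coordinates share a position
lemma pvBestCount_map_key (ks : List Int)
    (hinj : ∀ k ∈ ks, ∀ k' ∈ ks, pvKey k = pvKey k' → k = k') :
    pvBestCount (ks.map pvKey) = pvBestCount ks := by
  unfold pvBestCount
  rw [List.map_map]
  apply congrArg (List.foldr max 0)
  apply List.map_congr_left
  intro k hk
  simp only [Function.comp_def]
  have hcnt : (ks.map pvKey).count (pvKey k) = ks.count k := by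
    simp only [List.count, List.countP_map, Function.comp_def]
    exact List.countP_congr fun x hx => by
      constructor
      · intro h; exact beq_iff_eq.mpr (hinj x hx k hk (beq_iff_eq.mp h))
      · intro h; exact beq_iff_eq.mpr (congrArg pvKey (beq_iff_eq.mp h))
  rw [hcnt]

-- A's side: build-then-max over the count array is the largest multiplicity
lemma pvA_side (ks : List Int) (hb : ∀ k ∈ ks, -10001 ≤ k ∧ k ≤ 10000)
    (hnc : ∀ k ∈ ks, ∀ k' ∈ ks, k - k' ≠ 10001) :
    PySem.List.maxD (ks.foldl pvUpdA (List.replicate 10001 0)) (fun v => v) 0 =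
      pvBestCount ks := by
  have hkinj : ∀ k ∈ ks, ∀ k' ∈ ks, pvKey k = pvKey k' → k = k' := by
    intro k hk k' hk' he
    rw [pvKey_eq_emod, pvKey_eq_emod] at he
    have hb1 := hb k hk
    have hb2 := hb k' hk'
    have h1 := hnc k hk k' hk'
    have h2 := hnc k' hk' k hk
    omega
  rw [← pvBestCount_map_key ks hkinj]
  set mks := ks.map pvKey with hmks
  set arr := ks.foldl pvUpdA (List.replicate 10001 0) with harr
  obtain ⟨hlen, hchar⟩ := pvFold_char ks (List.replicate 10001 0) (by rw [List.length_replicate]) hb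
  rw [← harr] at hlen hchar
  have hmksb : ∀ m ∈ mks, 0 ≤ m ∧ m < 10001 := by
    intro m hm
    obtain ⟨k, _, rfl⟩ := List.mem_map.mp hm
    exact ⟨PySem.Int.mod_nonneg k (by norm_num), PySem.Int.mod_lt k (by norm_num)⟩
  have hcharz : ∀ p : Nat, p < 10001 → arr.getD p 0 = (mks.count (p : Int) : Int) := by
    intro p hp
    rw [hchar p hp, List.getD_replicate 0 hp, ← hmks]
    ring
  have hmem_arr : ∀ p : Nat, p < 10001 → arr.getD p 0 ∈ arr := by
    intro p hp
    rw [List.getD_eq_getElem?_getD, List.getElem?_eq_getElem (by omega)]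
    exact List.getElem_mem _
  have hne : arr ≠ [] := by intro h; rw [h] at hlen; simp at hlen
  obtain ⟨m, hm⟩ : ∃ m, PySem.List.max? arr (fun v => v) = some m := by
    cases h : PySem.List.max? arr (fun v => v) with
    | none => exact absurd ((PySem.List.max?_eq_none_iff arr _).mp h) hne
    | some m => exact ⟨m, rfl⟩
  have hmmem : m ∈ arr := PySem.List.max?_mem hm
  have hmmax : ∀ y ∈ arr, y ≤ m := PySem.List.max?_isMax hm
  have hm0 : 0 ≤ m := by
    have h0 := hcharz 0 (by omega)
    have hnn : (0 : Int) ≤ arr.getD 0 0 := by rw [h0]; positivity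
    have := hmmax _ (hmem_arr 0 (by omega))
    omega
  have h1 : m ≤ pvBestCount mks := by
    obtain ⟨p, hp, hpm⟩ := List.mem_iff_getElem.mp hmmem
    have hp' : p < 10001 := by omega
    have hmval : m = (mks.count (p : Int) : Int) := by
      rw [← hcharz p hp', List.getD_eq_getElem?_getD, List.getElem?_eq_getElem hp]
      simpa using hpm.symm
    by_cases hc : (p : Int) ∈ mks
    · rw [hmval]
      exact pvLe_foldrMax (List.mem_map.mpr ⟨(p : Int), hc, rfl⟩)
    · have : mks.count (p : Int) = 0 := List.count_eq_zero.mpr hc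
      rw [hmval, this]
      exact pvBestCount_nonneg mks
  have h2 : pvBestCount mks ≤ m := by
    apply pvFoldrMax_le _ hm0
    intro x hx
    obtain ⟨q, hq, rfl⟩ := List.mem_map.mp hx
    have hqb := hmksb q hq
    have hcast : ((q.toNat : Nat) : Int) = q := by omega
    have hv := hcharz q.toNat (by omega)
    rw [hcast] at hv
    exact hv ▸ hmmax _ (hmem_arr q.toNat (by omega))
  have hmB : m = pvBestCount mks := le_antisymm h1 h2
  simp [PySem.List.maxD, hm, hmB]

-- ===== VERDICT (by name: the statements are the Claim_ definitions above) =====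
theorem max_removed_emitters_spec : Claim_equal_max_removed_emitters := by
  intro N emitters sx sy _ hpre
  obtain ⟨hbnd, hnc⟩ := hpre
  unfold Spec_max_removed_emitters max_removed_emitters max_removed_emitters_alt
  have hpair := PySem.List.foldl_prod_mk (fun l (e : Int × Int) => pvUpdA l e.1)
    (fun l (e : Int × Int) => pvUpdA l e.2) emitters
    (List.replicate 10001 0) (List.replicate 10001 0)
  simp only at hpair ⊢
  rw [hpair]
  have hrow :
      emitters.foldl (fun l e => pvUpdA l e.1) (List.replicate 10001 0) =
      (emitters.map Prod.fst).foldl pvUpdA (List.replicate 10001 0) := by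
    rw [List.foldl_map]
  have hcol :
      emitters.foldl (fun l e => pvUpdA l e.2) (List.replicate 10001 0) =
      (emitters.map Prod.snd).foldl pvUpdA (List.replicate 10001 0) := by
    rw [List.foldl_map]
  rw [hrow, hcol,
    pvA_side (emitters.map Prod.fst)
      (by intro k hk; obtain ⟨e, he, rfl⟩ := List.mem_map.mp hk; exact (hbnd e he).1)
      (by intro k hk k' hk'
          obtain ⟨e, he, rfl⟩ := List.mem_map.mp hk
          obtain ⟨e', he', rfl⟩ := List.mem_map.mp hk'
          exact (hnc e he e' he').1),
    pvA_side (emitters.map Prod.snd)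
      (by intro k hk; obtain ⟨e, he, rfl⟩ := List.mem_map.mp hk; exact (hbnd e he).2)
      (by intro k hk k' hk'
          obtain ⟨e, he, rfl⟩ := List.mem_map.mp hk
          obtain ⟨e', he', rfl⟩ := List.mem_map.mp hk'
          exact (hnc e he e' he').2),
    pvB_side, pvB_side]
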